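-- pv_equiv track=rewrite | github.com/clipsmu/ks_gov_gear | utils_gov_gear.py | pareto_front_fast
-- ===== SOURCE A (Python) =====
-- def pareto_front_fast(solutions):
--     solutions_sorted = sorted(solutions, key=lambda x: (-x["gain"], -x["kvk"]))
--
--     pareto = []
--     best_kvk = -1
--
--     for s in solutions_sorted:
--         if s["kvk"] >= best_kvk:
--             pareto.append(s)
--             best_kvk = s["kvk"]
--
--     return pareto
-- ===== SOURCE B (Python) =====
-- def pareto_front_fast(solutions):
--     # Pareto front by all-pairs dominance: keep s iff no t has gain >= s's and strictly larger kvk.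
--     ordered = sorted(solutions, key=lambda x: (-x["gain"], -x["kvk"]))
--     return [s for s in ordered
--             if not any(t["gain"] >= s["gain"] and t["kvk"] > s["kvk"] for t in solutions)]
-- ===== Notes on version B (the rewrite author's own statement) =====
-- stated objective: alternative
-- what changed: B replaces A's fused sort-then-running-max scan (with its best_kvk=-1 sentinel) by an explicit all-pairs dominance filter over the sorted list; it trades a quadratic scan for not needing the accumulator.
-- intended difference: On inputs whose lexicographically best (max gain, then max kvk) solution has kvk <= -2, A's best_kvk=-1 sentinel silently drops that undominated solution (so A can return an empty front for a nonempty input) while B keeps it; a Pareto front should contain the best solution, so B's value is the intended one. — e.g. on pareto_front_fast([[("gain", 0), ("kvk", -2)]]): A returns [], B returns [[("gain", 0), ("kvk", -2)]]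
import Mathlib
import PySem

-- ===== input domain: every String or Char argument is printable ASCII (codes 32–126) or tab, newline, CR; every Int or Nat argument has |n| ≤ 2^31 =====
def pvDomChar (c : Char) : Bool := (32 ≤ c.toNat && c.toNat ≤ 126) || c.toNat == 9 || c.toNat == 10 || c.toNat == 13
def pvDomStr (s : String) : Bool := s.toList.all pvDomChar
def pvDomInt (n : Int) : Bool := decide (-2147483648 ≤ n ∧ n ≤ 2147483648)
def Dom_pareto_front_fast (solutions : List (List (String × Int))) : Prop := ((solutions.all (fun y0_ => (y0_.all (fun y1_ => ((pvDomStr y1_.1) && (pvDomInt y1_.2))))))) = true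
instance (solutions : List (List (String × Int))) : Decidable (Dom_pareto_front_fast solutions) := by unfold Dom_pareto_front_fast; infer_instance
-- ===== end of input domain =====

-- B replaces A's fused sort+running-max scan by an all-pairs dominance filter over the sorted list
-- (alternative decomposition; note: on sorted/filter outputs only — neither version mutates its argument).

-- ===== PORT A =====
-- x["gain"] / x["kvk"]: dict lookup; KeyError excluded by Pre_ (default never observed inside Pre_)
def getVal (s : List (String × Int)) (k : String) : Int :=
  ((PySem.Dict.mk s).get? k).getD 0

def pareto_front_fast (solutions : List (List (String × Int))) : List (List (String × Int)) :=
  let solutions_sorted := PySem.List.sorted2 solutions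
    (fun x => -(getVal x "gain")) (fun x => -(getVal x "kvk"))
  -- for s in solutions_sorted: if s["kvk"] >= best_kvk: pareto.append(s); best_kvk = s["kvk"]
  (solutions_sorted.foldl
    (fun (acc : List (List (String × Int)) × Int) s =>
      if acc.2 ≤ getVal s "kvk" then (acc.1 ++ [s], getVal s "kvk") else acc)
    ([], -1)).1

-- ===== PORT B =====
def pareto_front_fast_alt (solutions : List (List (String × Int))) : List (List (String × Int)) :=
  let ordered := PySem.List.sorted2 solutions
    (fun x => -(getVal x "gain")) (fun x => -(getVal x "kvk"))
  ordered.filter (fun s =>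
    ! solutions.any (fun t =>
        decide (getVal s "gain" ≤ getVal t "gain") && decide (getVal s "kvk" < getVal t "kvk")))

-- ===== PRECONDITION & SPEC =====
-- Pre_ excludes exactly the inputs on which Python A raises KeyError: a solution dict missing "gain" or "kvk".
def Pre_pareto_front_fast (solutions : List (List (String × Int))) : Prop :=
  ∀ s ∈ solutions, (PySem.Dict.mk s).contains "gain" = true ∧ (PySem.Dict.mk s).contains "kvk" = true
instance (solutions : List (List (String × Int))) : Decidable (Pre_pareto_front_fast solutions) := by
  unfold Pre_pareto_front_fast; infer_instance

def pvWitness_pareto_front_fast : (List (List (String × Int))) :=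
  [[("gain", 3), ("kvk", 1)], [("gain", 1), ("kvk", 2)]]

-- On inputs whose lexicographically best (max gain, then max kvk among those) solution has kvk ≤ -2,
-- A's best_kvk = -1 sentinel silently drops that undominated solution (A can even return an empty
-- front on a nonempty input) while B keeps it; a Pareto front of a nonempty set should contain its best element,
-- so B's value is the intended one.
def D_pareto_front_fast (solutions : List (List (String × Int))) : Prop :=
  ∃ s ∈ solutions, getVal s "kvk" ≤ -2 ∧
    ∀ t ∈ solutions, getVal t "gain" < getVal s "gain" ∨
      (getVal s "gain" = getVal t "gain" ∧ getVal t "kvk" ≤ getVal s "kvk")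
instance (solutions : List (List (String × Int))) : Decidable (D_pareto_front_fast solutions) := by
  unfold D_pareto_front_fast; infer_instance

def Spec_pareto_front_fast (solutions : List (List (String × Int))) (out : List (List (String × Int))) : Prop :=
  ¬ D_pareto_front_fast solutions → out = pareto_front_fast_alt solutions
instance (solutions : List (List (String × Int))) (out : List (List (String × Int))) : Decidable (Spec_pareto_front_fast solutions out) := by
  unfold Spec_pareto_front_fast; infer_instance

def pvDiffWitness_pareto_front_fast : (List (List (String × Int))) := [[("gain", 0), ("kvk", -2)]]
def pvDiffWitnessOut_pareto_front_fast : (List (List (String × Int))) × (List (List (String × Int))) :=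
  ([], [[("gain", 0), ("kvk", -2)]])

-- ===== CLAIM (what is proved, stated in full; the proofs are below) =====
def Claim_unchanged_pareto_front_fast : Prop := ∀ (solutions : List (List (String × Int))), Dom_pareto_front_fast solutions → Pre_pareto_front_fast solutions → Spec_pareto_front_fast solutions (pareto_front_fast solutions)
def Claim_changed_pareto_front_fast : Prop := Dom_pareto_front_fast (pvDiffWitness_pareto_front_fast) ∧ Pre_pareto_front_fast (pvDiffWitness_pareto_front_fast) ∧ D_pareto_front_fast (pvDiffWitness_pareto_front_fast) ∧ pareto_front_fast (pvDiffWitness_pareto_front_fast) = pvDiffWitnessOut_pareto_front_fast.1 ∧ pareto_front_fast_alt (pvDiffWitness_pareto_front_fast) = pvDiffWitnessOut_pareto_front_fast.2 ∧ pvDiffWitnessOut_pareto_front_fast.1 ≠ pvDiffWitnessOut_pareto_front_fast.2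
def Claim_exact_pareto_front_fast : Prop := ∀ (solutions : List (List (String × Int))), Dom_pareto_front_fast solutions → Pre_pareto_front_fast solutions → D_pareto_front_fast solutions → pareto_front_fast solutions ≠ pareto_front_fast_alt solutions

-- ===== LEMMAS AND PROOFS =====

-- abbreviations for the two looked-up fields
def gv (s : List (String × Int)) : Int := getVal s "gain"
def kv (s : List (String × Int)) : Int := getVal s "kvk"

-- "a is sorted no later than b" under key (-gain, -kvk)
def lexge (a b : List (String × Int)) : Prop :=
  gv b < gv a ∨ (gv a = gv b ∧ kv b ≤ kv a)

-- the comparison sorted2 uses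
def bf (a b : List (String × Int)) : Bool :=
  decide ((-(gv a)) < (-(gv b))) || (! decide ((-(gv b)) < (-(gv a))) && decide ((-(kv a)) < (-(kv b))))

lemma bf_false_iff (a b : List (String × Int)) : bf b a = false ↔ lexge a b := by
  simp [bf, lexge]; omega

lemma bf_asymm (a b : List (String × Int)) : bf a b = true → bf b a = false := by
  simp [bf]; omega

lemma bf_trans (a b c : List (String × Int)) : bf a b = true → bf b c = true → bf a c = true := by
  simp [bf]; omega

lemma pairwise_insertBy (x : List (String × Int)) (acc : List (List (String × Int)))
    (hacc : acc.Pairwise (fun a b => bf b a = false)) :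
    (PySem.List.insertBy bf x acc).Pairwise (fun a b => bf b a = false) := by
  induction acc with
  | nil => simp [PySem.List.insertBy]
  | cons y ys ih =>
    rw [List.pairwise_cons] at hacc
    obtain ⟨hy, hys⟩ := hacc
    simp only [PySem.List.insertBy]
    split
    · rename_i hxy
      refine List.pairwise_cons.mpr ⟨?_, List.pairwise_cons.mpr ⟨hy, hys⟩⟩
      intro z hz
      rcases List.mem_cons.mp hz with hz1 | hz1
      · subst hz1; exact bf_asymm _ _ hxy
      · -- z ∈ ys, bf y z = false; if bf z x then bf z y (trans with bf x y), contradiction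
        rcases Bool.eq_false_or_eq_true (bf z x) with h | h
        · exfalso
          have htr := bf_trans z x y h hxy
          rw [hy z hz1] at htr; exact absurd htr (by simp)
        · exact h
    · rename_i hxy
      refine List.pairwise_cons.mpr ⟨?_, ih hys⟩
      intro z hz
      rw [PySem.List.insertBy_mem_iff] at hz
      rcases hz with hz1 | hz1
      · subst hz1; exact Bool.of_not_eq_true hxy
      · exact hy z hz1

lemma pairwise_foldl_insertBy (xs acc : List (List (String × Int)))
    (hacc : acc.Pairwise (fun a b => bf b a = false)) :
    (xs.foldl (fun acc x => PySem.List.insertBy bf x acc) acc).Pairwise (fun a b => bf b a = false) := by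
  induction xs generalizing acc with
  | nil => exact hacc
  | cons x xs ih => exact ih _ (pairwise_insertBy x acc hacc)

def sortedL (solutions : List (List (String × Int))) : List (List (String × Int)) :=
  PySem.List.sorted2 solutions (fun x => -(getVal x "gain")) (fun x => -(getVal x "kvk"))

lemma sortedL_eq_foldl (solutions : List (List (String × Int))) :
    sortedL solutions = solutions.foldl (fun acc x => PySem.List.insertBy bf x acc) [] := by
  rfl

lemma sortedL_pairwise (solutions : List (List (String × Int))) :
    (sortedL solutions).Pairwise lexge := by
  rw [sortedL_eq_foldl]
  have h := pairwise_foldl_insertBy solutions [] (by simp)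
  exact h.imp (fun hab => (bf_false_iff _ _).mp hab)

lemma sortedL_mem (solutions : List (List (String × Int))) (x : List (String × Int)) :
    x ∈ sortedL solutions ↔ x ∈ solutions :=
  (PySem.List.sorted2_perm solutions _ _ false).mem_iff

-- A's loop body as structural recursion on the sorted list
def scanGo : List (List (String × Int)) → Int → List (List (String × Int))
  | [], _ => []
  | s :: ss, best => if best ≤ kv s then s :: scanGo ss (kv s) else scanGo ss best

lemma foldl_eq_scanGo (ys : List (List (String × Int)))
    (acc : List (List (String × Int))) (best : Int) :
    (ys.foldl
      (fun (p : List (List (String × Int)) × Int) s =>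
        if p.2 ≤ getVal s "kvk" then (p.1 ++ [s], getVal s "kvk") else p)
      (acc, best)).1 = acc ++ scanGo ys best := by
  induction ys generalizing acc best with
  | nil => simp [scanGo]
  | cons s ss ih =>
    simp only [List.foldl_cons, scanGo]
    by_cases h : best ≤ getVal s "kvk"
    · rw [if_pos h, if_pos (show best ≤ kv s from h), ih]; simp [kv]
    · rw [if_neg h, if_neg (show ¬ best ≤ kv s from h), ih]

-- B's per-element predicate
def PB (sols : List (List (String × Int))) (s : List (String × Int)) : Bool :=
  ! sols.any (fun t =>
      decide (getVal s "gain" ≤ getVal t "gain") && decide (getVal s "kvk" < getVal t "kvk"))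

lemma PB_iff (sols : List (List (String × Int))) (s : List (String × Int)) :
    PB sols s = true ↔ ∀ t ∈ sols, ¬ (gv s ≤ gv t ∧ kv s < kv t) := by
  simp [PB, gv, kv]

-- running max of kvk over the consumed prefix, seeded with A's -1 sentinel
def bestOf (pre : List (List (String × Int))) : Int :=
  pre.foldl (fun m t => max m (kv t)) (-1)

lemma foldl_max_le_iff (l : List (List (String × Int))) (i c : Int) :
    l.foldl (fun m t => max m (kv t)) i ≤ c ↔ i ≤ c ∧ ∀ t ∈ l, kv t ≤ c := by
  induction l generalizing i with
  | nil => simp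
  | cons t ts ih =>
    simp only [List.foldl_cons, ih, max_le_iff, List.mem_cons]
    constructor
    · rintro ⟨⟨h1, h2⟩, h3⟩
      refine ⟨h1, fun u hu => ?_⟩
      rcases hu with hu | hu
      · subst hu; exact h2
      · exact h3 u hu
    · rintro ⟨h1, h2⟩; exact ⟨⟨h1, h2 t (Or.inl rfl)⟩, fun u hu => h2 u (Or.inr hu)⟩

lemma bestOf_le_iff (pre : List (List (String × Int))) (c : Int) :
    bestOf pre ≤ c ↔ -1 ≤ c ∧ ∀ t ∈ pre, kv t ≤ c :=
  foldl_max_le_iff pre (-1) c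

lemma bestOf_append_singleton (pre : List (List (String × Int))) (s : List (String × Int)) :
    bestOf (pre ++ [s]) = max (bestOf pre) (kv s) := by
  simp [bestOf]

-- the heart of the proof: A's sentinel scan = B's dominance filter, on any lex-nonincreasing
-- arrangement whose head (if any) has kvk ≥ -1
lemma scan_eq_filter (sols L : List (List (String × Int)))
    (hmem : ∀ x, x ∈ L ↔ x ∈ sols)
    (hpw : L.Pairwise lexge)
    (hhead : ∀ h, L.head? = some h → -1 ≤ kv h) :
    ∀ ys pre, L = pre ++ ys → scanGo ys (bestOf pre) = ys.filter (PB sols) := by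
  intro ys
  induction ys with
  | nil => intro pre _; simp [scanGo]
  | cons s ss ih =>
    intro pre hL
    have hsplit := hpw
    rw [hL, List.pairwise_append] at hsplit
    obtain ⟨hpre, hcons, hcross⟩ := hsplit
    rw [List.pairwise_cons] at hcons
    have hA : ∀ t ∈ pre, lexge t s := fun t ht => hcross t ht s (List.mem_cons_self ..)
    have hB : ∀ t ∈ ss, lexge s t := hcons.1
    -- B's keep condition for s equals "no earlier element has strictly larger kvk"
    have cB : PB sols s = true ↔ ∀ t ∈ pre, kv t ≤ kv s := by
      rw [PB_iff]
      constructor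
      · intro h t ht
        rcases hA t ht with hlt | ⟨heq, _⟩
        · by_contra hk
          exact h t ((hmem t).mp (by rw [hL]; exact List.mem_append_left _ ht)) ⟨le_of_lt hlt, by omega⟩
        · by_contra hk
          exact h t ((hmem t).mp (by rw [hL]; exact List.mem_append_left _ ht)) ⟨le_of_eq heq.symm, by omega⟩
      · intro h t ht
        have htL : t ∈ L := (hmem t).mpr ht
        rw [hL] at htL
        rcases List.mem_append.mp htL with htp | htc
        · have := h t htp; rintro ⟨_, hk⟩; omega
        · rcases List.mem_cons.mp htc with rfl | hts
          · rintro ⟨_, hk⟩; omega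
          · rcases hB t hts with hlt | ⟨heq, hle⟩
            · rintro ⟨hg, _⟩; omega
            · rintro ⟨_, hk⟩; omega
    -- A's keep condition equals B's
    have cAB : (bestOf pre ≤ kv s) ↔ PB sols s = true := by
      rw [bestOf_le_iff, cB]
      constructor
      · rintro ⟨_, h⟩; exact h
      · intro h
        refine ⟨?_, h⟩
        cases pre with
        | nil =>
          have : L.head? = some s := by rw [hL]; rfl
          exact hhead s this
        | cons p ps =>
          have hp : L.head? = some p := by rw [hL]; rfl
          have h1 : -1 ≤ kv p := hhead p hp
          have h2 : kv p ≤ kv s := h p (List.mem_cons_self ..)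
          omega
    simp only [scanGo, List.filter_cons]
    by_cases hkeep : bestOf pre ≤ kv s
    · rw [if_pos hkeep, if_pos (cAB.mp hkeep)]
      have hbs : bestOf (pre ++ [s]) = kv s := by
        rw [bestOf_append_singleton]; omega
      rw [← hbs, ih (pre ++ [s]) (by rw [hL, List.append_assoc]; rfl)]
    · rw [if_neg hkeep]
      have hPB : ¬ PB sols s = true := fun h => hkeep (cAB.mpr h)
      rw [if_neg hPB]
      have hbs : bestOf (pre ++ [s]) = bestOf pre := by
        rw [bestOf_append_singleton]; omega
      rw [← hbs, ih (pre ++ [s]) (by rw [hL, List.append_assoc]; rfl)]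

lemma head_lexge (L : List (List (String × Int))) (hpw : L.Pairwise lexge)
    (h : List (String × Int)) (hh : L.head? = some h) :
    ∀ x ∈ L, lexge h x := by
  cases L with
  | nil => simp at hh
  | cons a t =>
    obtain rfl : a = h := by simpa using hh
    rw [List.pairwise_cons] at hpw
    intro x hx
    rcases List.mem_cons.mp hx with rfl | hx
    · right; exact ⟨rfl, le_refl _⟩
    · exact hpw.1 x hx

lemma head_kv_of_notD (solutions : List (List (String × Int)))
    (hD : ¬ D_pareto_front_fast solutions)
    (h : List (String × Int)) (hh : (sortedL solutions).head? = some h) :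
    -1 ≤ kv h := by
  by_contra hk
  apply hD
  refine ⟨h, ?_, ?_, ?_⟩
  · exact (sortedL_mem solutions h).mp (List.mem_of_mem_head? hh)
  · show kv h ≤ -2; omega
  · intro t ht
    have := head_lexge _ (sortedL_pairwise solutions) h hh t ((sortedL_mem solutions t).mpr ht)
    rcases this with hlt | ⟨heq, hle⟩
    · left; exact hlt
    · right; exact ⟨heq, hle⟩

lemma ports_eq (solutions : List (List (String × Int))) (hD : ¬ D_pareto_front_fast solutions) :
    pareto_front_fast solutions = pareto_front_fast_alt solutions := by
  show (((sortedL solutions).foldl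
      (fun (p : List (List (String × Int)) × Int) s =>
        if p.2 ≤ getVal s "kvk" then (p.1 ++ [s], getVal s "kvk") else p)
      ([], -1)).1) = (sortedL solutions).filter (PB solutions)
  rw [foldl_eq_scanGo, List.nil_append]
  have : (-1 : Int) = bestOf [] := rfl
  rw [this]
  exact scan_eq_filter solutions (sortedL solutions) (sortedL_mem solutions)
    (sortedL_pairwise solutions) (head_kv_of_notD solutions hD) (sortedL solutions) [] rfl

-- tight direction helpers
lemma scanGo_kv_ge (ys : List (List (String × Int))) (best : Int) (hb : -1 ≤ best) :
    ∀ x ∈ scanGo ys best, -1 ≤ kv x := by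
  induction ys generalizing best with
  | nil => simp [scanGo]
  | cons s ss ih =>
    simp only [scanGo]
    split
    · rename_i hk
      intro x hx
      rcases List.mem_cons.mp hx with rfl | hx
      · omega
      · exact ih (kv s) (by omega) x hx
    · exact ih best hb

-- ===== VERDICT (by name: the statement is the Claim_ definition above) =====
theorem pareto_front_fast_spec : Claim_unchanged_pareto_front_fast := by
  intro solutions _ _ hD
  exact (ports_eq solutions hD).symm ▸ rfl

theorem pareto_front_fast_changed : Claim_changed_pareto_front_fast := by
  unfold Claim_changed_pareto_front_fast; decide

theorem pareto_front_fast_tight : Claim_exact_pareto_front_fast := by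
  intro solutions _ _ hD heq
  obtain ⟨s, hs, hks, hmax⟩ := hD
  have hsL : s ∈ sortedL solutions := (sortedL_mem solutions s).mpr hs
  obtain ⟨h, hh⟩ : ∃ h, (sortedL solutions).head? = some h := by
    cases hL : sortedL solutions with
    | nil => rw [hL] at hsL; simp at hsL
    | cons a t => exact ⟨a, by simp only [List.head?_cons]⟩
  -- kv h = kv s ≤ -2
  have hhmax := head_lexge _ (sortedL_pairwise solutions) h hh
  have h1 := hhmax s hsL
  have h2 := hmax h ((sortedL_mem solutions h).mp (List.mem_of_mem_head? hh))
  have hkh : kv h ≤ -2 := by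
    rcases h1 with hlt | ⟨heq, hle⟩ <;> rcases h2 with hlt2 | ⟨heq2, hle2⟩ <;>
      simp [gv, kv] at * <;> omega
  -- h is kept by B (it is undominated)
  have hPBh : PB solutions h = true := by
    rw [PB_iff]
    intro t ht
    rcases hhmax t ((sortedL_mem solutions t).mpr ht) with hlt | ⟨heq, hle⟩
    · rintro ⟨hg, _⟩; omega
    · rintro ⟨_, hk⟩; omega
  -- so h ∈ B's output
  have hhB : h ∈ pareto_front_fast_alt solutions := by
    show h ∈ (sortedL solutions).filter (PB solutions)
    exact List.mem_filter.mpr ⟨List.mem_of_mem_head? hh, hPBh⟩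
  -- but every element of A's output has kvk ≥ -1
  rw [← heq] at hhB
  have : -1 ≤ kv h := by
    have hA : pareto_front_fast solutions = scanGo (sortedL solutions) (-1) := by
      show (((sortedL solutions).foldl _ ([], -1)).1) = _
      rw [foldl_eq_scanGo, List.nil_append]
    rw [hA] at hhB
    exact scanGo_kv_ge _ _ (le_refl _) h hhB
  omega
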